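-- pv_equiv track=rewrite | github.com/smchugh/mbgame-ai | app/scripts/ai_worker.py | last_pile
-- ===== SOURCE A (Python) =====
-- def last_pile(piles):
--     pile = None
--     beans = None
--     # Look through all piles to see if all but one are empty, and return the non-empty pile in that case
--     for i, num_beans in enumerate(piles):
--         if num_beans > 0:
--             # If we already found a non-empty pile, reset pile to None and break out of the loop
--             if pile is not None:
--                 pile = None
--                 break
--
--             # Record which pile is not empty and how many beans are left
--             pile = i
--             beans = num_beans
--
--     # If we found a sole non-empty pile then we return it
--     if pile is None:
--         return None, None
--
--     return pile, beans
-- ===== SOURCE B (Python) =====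
-- def last_pile(piles):
--     def summarize(lo, hi):
--         # Up to two of the non-empty piles (index, beans) in piles[lo:hi], by divide and conquer.
--         if hi <= lo:
--             return []
--         if hi == lo + 1:
--             return [(lo, piles[lo])] if piles[lo] > 0 else []
--         mid = (lo + hi) // 2
--         left = summarize(lo, mid)
--         if len(left) > 1:
--             return left
--         return (left + summarize(mid, hi))[:2]
--
--     s = summarize(0, len(piles))
--     return s[0] if len(s) == 1 else (None, None)
-- ===== Notes on version B (the rewrite author's own statement) =====
-- stated objective: alternative
-- what changed: B replaces A's single-pass candidate-with-early-break scan by a divide-and-conquer recursion that merges per-half summaries of at most two non-empty piles and decides by the summary's length.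
import Mathlib
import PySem

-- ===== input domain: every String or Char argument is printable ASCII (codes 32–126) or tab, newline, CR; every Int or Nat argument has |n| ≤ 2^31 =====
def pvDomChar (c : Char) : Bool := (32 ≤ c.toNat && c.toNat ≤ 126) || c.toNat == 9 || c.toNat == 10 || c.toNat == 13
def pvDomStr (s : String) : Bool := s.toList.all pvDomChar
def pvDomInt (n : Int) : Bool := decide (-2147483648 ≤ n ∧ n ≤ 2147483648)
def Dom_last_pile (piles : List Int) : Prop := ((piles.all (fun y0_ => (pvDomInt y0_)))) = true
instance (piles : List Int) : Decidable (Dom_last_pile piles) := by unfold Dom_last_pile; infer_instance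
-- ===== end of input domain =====

-- B replaces A's single-pass candidate scan with a divide-and-conquer recursion over index
-- ranges, merging per-half summaries capped at two non-empty piles; objective: alternative.

-- ===== PORT A =====
-- A's loop over enumerate(piles), tracking candidate pile/beans, breaking on a second
-- non-empty pile (the break with pile=None ends in the (None, None) return).
def lastPileGoA : List Int → Int → Option Int → Option Int → Option Int × Option Int
  | [], _, pile, beans =>
    match pile with
    | none => (none, none)
    | some p => (some p, beans)
  | n :: rest, i, pile, beans =>
    if n > 0 then
      match pile with
      | some _ => (none, none)      -- pile = None; break → returns None, None
      | none => lastPileGoA rest (i + 1) (some i) (some n)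
    else
      lastPileGoA rest (i + 1) pile beans

def last_pile (piles : List Int) : Option Int × Option Int :=
  lastPileGoA piles 0 none none

-- ===== PORT B =====
-- summarize(lo, hi): up to two of the non-empty piles (index, beans) in piles[lo:hi].
-- Indices lo reached by the recursion always satisfy lo < piles.length, so
-- piles.getD lo 0 is exactly Python's piles[lo] on every reachable call.
def lpSummarize (piles : List Int) : Nat → Nat → Nat → List (Int × Int)
  | 0, _, _ => []          -- fuel (a totality guard only; fuel = hi - lo at the top call suffices)
  | fuel + 1, lo, hi =>
    if hi ≤ lo then []
    else if hi = lo + 1 then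
      if piles.getD lo 0 > 0 then [((lo : Int), piles.getD lo 0)] else []
    else
      let mid := (lo + hi) / 2
      let left := lpSummarize piles fuel lo mid
      if 1 < left.length then left
      else (left ++ lpSummarize piles fuel mid hi).take 2

def last_pile_alt (piles : List Int) : Option Int × Option Int :=
  match lpSummarize piles piles.length 0 piles.length with
  | [x] => (some x.1, some x.2)
  | _ => (none, none)

-- ===== PRECONDITION & SPEC =====
def Spec_last_pile (piles : List Int) (out : Option Int × Option Int) : Prop := out = last_pile_alt piles
instance (piles : List Int) (out : Option Int × Option Int) : Decidable (Spec_last_pile piles out) := by unfold Spec_last_pile; infer_instance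

-- ===== CLAIM (what is proved, stated in full; the proofs are below) =====
def Claim_equal_last_pile : Prop := ∀ (piles : List Int), Dom_last_pile piles → Spec_last_pile piles (last_pile piles)

-- ===== LEMMAS AND PROOFS =====

-- The (index, beans) pairs of the non-empty piles with index in [lo, hi).
def nonemptyIdx (piles : List Int) (lo hi : Nat) : List (Int × Int) :=
  (List.range' lo (hi - lo)).filterMap
    (fun i => if 0 < piles.getD i 0 then some ((i : Int), piles.getD i 0) else none)

theorem nonemptyIdx_nil (piles : List Int) (lo hi : Nat) (h : hi ≤ lo) :
    nonemptyIdx piles lo hi = [] := by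
  unfold nonemptyIdx
  have : hi - lo = 0 := by omega
  simp [this]

theorem nonemptyIdx_one (piles : List Int) (lo : Nat) :
    nonemptyIdx piles lo (lo + 1) =
      if 0 < piles.getD lo 0 then [((lo : Int), piles.getD lo 0)] else [] := by
  unfold nonemptyIdx
  have h1 : lo + 1 - lo = 1 := by omega
  rw [h1, List.range'_one]
  simp only [List.filterMap_cons, List.filterMap_nil]
  split_ifs <;> rfl

theorem nonemptyIdx_split (piles : List Int) (lo mid hi : Nat)
    (h1 : lo ≤ mid) (h2 : mid ≤ hi) :
    nonemptyIdx piles lo hi = nonemptyIdx piles lo mid ++ nonemptyIdx piles mid hi := by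
  unfold nonemptyIdx
  rw [← List.filterMap_append]
  have h := List.range'_append_1 (s := lo) (m := mid - lo) (n := hi - mid)
  have e1 : lo + (mid - lo) = mid := by omega
  have e2 : mid - lo + (hi - mid) = hi - lo := by omega
  rw [e1, e2] at h
  rw [← h]

-- lpSummarize computes the first two elements of nonemptyIdx (given enough fuel).
theorem lpSummarize_eq (piles : List Int) : ∀ (fuel lo hi : Nat), hi - lo ≤ fuel →
    lpSummarize piles fuel lo hi = (nonemptyIdx piles lo hi).take 2 := by
  intro fuel
  induction fuel with
  | zero =>
    intro lo hi h
    rw [nonemptyIdx_nil piles lo hi (by omega)]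
    rfl
  | succ k ih =>
    intro lo hi hfuel
    show (if hi ≤ lo then [] else _) = _
    by_cases h0 : hi ≤ lo
    · simp [h0, nonemptyIdx_nil piles lo hi h0]
    · simp only [h0, if_false]
      by_cases h1 : hi = lo + 1
      · subst h1
        rw [if_pos rfl, nonemptyIdx_one]
        split_ifs <;> rfl
      · simp only [h1, if_false]
        have hlo : lo + 2 ≤ hi := by omega
        set mid := (lo + hi) / 2 with hmid
        have hm1 : lo < mid := by omega
        have hm2 : mid < hi := by omega
        have hL : lpSummarize piles k lo mid = (nonemptyIdx piles lo mid).take 2 :=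
          ih lo mid (by omega)
        have hR : lpSummarize piles k mid hi = (nonemptyIdx piles mid hi).take 2 :=
          ih mid hi (by omega)
        rw [hL, hR, nonemptyIdx_split piles lo mid hi (by omega) (by omega)]
        by_cases hlen : 1 < ((nonemptyIdx piles lo mid).take 2).length
        · simp only [hlen, if_pos]
          have h2 : 2 ≤ (nonemptyIdx piles lo mid).length := by
            have ht : ((nonemptyIdx piles lo mid).take 2).length = min 2 (nonemptyIdx piles lo mid).length := List.length_take
            omega
          rw [List.take_append_of_le_length h2]
        · simp only [hlen]
          have h2 : (nonemptyIdx piles lo mid).take 2 = nonemptyIdx piles lo mid := by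
            apply List.take_of_length_le
            have ht : ((nonemptyIdx piles lo mid).take 2).length = min 2 (nonemptyIdx piles lo mid).length := List.length_take
            omega
          have hmin : min (2 - (nonemptyIdx piles lo mid).length) 2 = 2 - (nonemptyIdx piles lo mid).length := by omega
          rw [h2, List.take_append, List.take_append, List.take_take, hmin]
          simp

-- With a candidate already recorded, A returns it iff no further pile is non-empty.
-- (stated over nonemptyIdx via the drop view)
theorem goA_some (piles : List Int) : ∀ (n lo : Nat) (p b : Int), piles.length - lo = n →
    lastPileGoA (piles.drop lo) (lo : Int) (some p) (some b) =
      (if nonemptyIdx piles lo piles.length = [] then (some p, some b) else (none, none)) := by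
  intro n
  induction n with
  | zero =>
    intro lo p b h
    have hd : piles.drop lo = [] := List.drop_eq_nil_of_le (by omega)
    rw [hd, nonemptyIdx_nil piles lo piles.length (by omega)]
    simp [lastPileGoA]
  | succ k ih =>
    intro lo p b h
    have hlt : lo < piles.length := by omega
    have hd : piles.drop lo = piles[lo] :: piles.drop (lo + 1) :=
      List.drop_eq_getElem_cons hlt
    have hg : piles.getD lo 0 = piles[lo] := by
      simp [List.getD, List.getElem?_eq_getElem hlt]
    rw [hd, nonemptyIdx_split piles lo (lo + 1) piles.length (by omega) (by omega),
        nonemptyIdx_one]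
    simp only [lastPileGoA, hg]
    by_cases hp : piles[lo] > 0
    · simp [hp]
    · have hp' : ¬ (0 : Int) < piles[lo] := by omega
      have := ih (lo + 1) p b (by omega)
      push_cast at this ⊢
      simp only [hp, if_false, List.nil_append]
      convert this using 2 <;> push_cast <;> ring

theorem goA_none (piles : List Int) : ∀ (n lo : Nat), piles.length - lo = n →
    lastPileGoA (piles.drop lo) (lo : Int) none none =
      (match nonemptyIdx piles lo piles.length with
       | [x] => (some x.1, some x.2)
       | _ => (none, none)) := by
  intro n
  induction n with
  | zero =>
    intro lo h
    have hd : piles.drop lo = [] := List.drop_eq_nil_of_le (by omega)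
    rw [hd, nonemptyIdx_nil piles lo piles.length (by omega)]
    simp [lastPileGoA]
  | succ k ih =>
    intro lo h
    have hlt : lo < piles.length := by omega
    have hd : piles.drop lo = piles[lo] :: piles.drop (lo + 1) :=
      List.drop_eq_getElem_cons hlt
    have hg : piles.getD lo 0 = piles[lo] := by
      simp [List.getD, List.getElem?_eq_getElem hlt]
    rw [hd, nonemptyIdx_split piles lo (lo + 1) piles.length (by omega) (by omega),
        nonemptyIdx_one]
    simp only [lastPileGoA, hg]
    by_cases hp : piles[lo] > 0
    · simp only [hp, if_pos]
      have hgs := goA_some piles k (lo + 1) lo piles[lo] (by omega)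
      push_cast at hgs ⊢
      rw [hgs]
      cases hres : nonemptyIdx piles (lo + 1) piles.length <;> simp
    · have hp' : ¬ (0 : Int) < piles[lo] := by omega
      have := ih (lo + 1) (by omega)
      push_cast at this ⊢
      simp only [hp, if_false, List.nil_append]
      convert this using 2 <;> push_cast <;> ring

-- ===== VERDICT (by name: the statement is the Claim_ definition above) =====
theorem last_pile_spec : Claim_equal_last_pile := by
  intro piles _
  unfold Spec_last_pile last_pile last_pile_alt
  have hA := goA_none piles piles.length 0 (by omega)
  simp only [List.drop_zero, Nat.cast_zero] at hA
  rw [hA, lpSummarize_eq piles piles.length 0 piles.length (by omega)]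
  cases hres : nonemptyIdx piles 0 piles.length with
  | nil => simp
  | cons a t =>
    cases t with
    | nil => simp
    | cons b r => simp [List.take]
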